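-- pv_equiv track=rewrite | github.com/TTTTTony32/EEG-Denoising-Comparation | approaches/EEGDiR/model_analysis_retnet.py | analyze_MultiScaleRetention
-- ===== SOURCE A (Python) =====
-- def analyze_SimpleRetention(hidden_size, head_size, v_dim, sequence_length):
--     """
--     分析单个SimpleRetention模块
--     """
--     params = 0
--     flops = 0
--
--     # 参数量计算
--     # W_Q: hidden_size × head_size
--     # W_K: hidden_size × head_size
--     # W_V: hidden_size × v_dim
--     wq_params = hidden_size * head_size
--     wk_params = hidden_size * head_size
--     wv_params = hidden_size * v_dim
--     params = wq_params + wk_params + wv_params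
--
--     # FLOPs计算
--     # Q = X @ W_Q: batch_size × sequence_length × hidden_size @ hidden_size × head_size
--     q_flops = sequence_length * hidden_size * head_size
--
--     # K = X @ W_K: 同上
--     k_flops = sequence_length * hidden_size * head_size
--
--     # V = X @ W_V: batch_size × sequence_length × hidden_size @ hidden_size × v_dim
--     v_flops = sequence_length * hidden_size * v_dim
--
--     # Q @ K^T: batch_size × sequence_length × head_size @ head_size × sequence_length
--     qk_flops = sequence_length * head_size * sequence_length
--
--     # (Q @ K^T * D) @ V: batch_size × sequence_length × sequence_length @ sequence_length × v_dim
--     output_flops = sequence_length * sequence_length * v_dim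
--
--     # XPOS旋转位置编码的额外计算
--     xpos_flops = sequence_length * head_size * 4  # sin, cos, 旋转操作
--
--     flops = q_flops + k_flops + v_flops + qk_flops + output_flops + xpos_flops
--
--     return params, flops
--
-- def analyze_MultiScaleRetention(hidden_size, heads, double_v_dim, sequence_length):
--     """
--     分析MultiScaleRetention模块
--     """
--     v_dim = hidden_size * 2 if double_v_dim else hidden_size
--     head_size = hidden_size // heads
--     head_v_dim = hidden_size * 2 if double_v_dim else hidden_size
--
--     params = 0
--     flops = 0
--
--     # 每个头的SimpleRetention
--     retention_params = 0
--     retention_flops = 0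
--     for i in range(heads):
--         head_params, head_flops = analyze_SimpleRetention(hidden_size, head_size, head_v_dim, sequence_length)
--         retention_params += head_params
--         retention_flops += head_flops
--
--     # W_G: hidden_size × v_dim
--     wg_params = hidden_size * v_dim
--
--     # W_O: v_dim × hidden_size
--     wo_params = v_dim * hidden_size
--
--     # GroupNorm参数: heads个组，每组v_dim/heads个参数，共2*v_dim个参数(scale+bias)
--     group_norm_params = 2 * v_dim
--
--     params = retention_params + wg_params + wo_params + group_norm_params
--
--     # FLOPs计算
--     # X @ W_G: sequence_length × hidden_size × v_dim
--     wg_flops = sequence_length * hidden_size * v_dim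
--
--     # Swish激活函数: v_dim × sequence_length
--     swish_flops = sequence_length * v_dim * 2  # sigmoid + multiply
--
--     # (swish(X @ W_G) * Y) @ W_O: sequence_length × v_dim × hidden_size
--     output_flops = sequence_length * v_dim * hidden_size
--
--     # GroupNorm: 大约 4 × v_dim × sequence_length 的操作
--     group_norm_flops = 4 * v_dim * sequence_length
--
--     flops = retention_flops + wg_flops + swish_flops + output_flops + group_norm_flops
--
--     return params, flops
-- ===== SOURCE B (Python) =====
-- def analyze_MultiScaleRetention(hidden_size, heads, double_v_dim, sequence_length):
--     # Closed form: per-head cost computed once, multiplied by heads (no loop).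
--     v_dim = 2 * hidden_size if double_v_dim else hidden_size
--     head_size = hidden_size // heads
--     per_head_params = hidden_size * (2 * head_size + v_dim)
--     per_head_flops = sequence_length * (hidden_size * (2 * head_size + v_dim)
--                                         + head_size * (sequence_length + 4)
--                                         + sequence_length * v_dim)
--     params = heads * per_head_params + 2 * hidden_size * v_dim + 2 * v_dim
--     flops = heads * per_head_flops + sequence_length * v_dim * (2 * hidden_size + 6)
--     return params, flops
-- ===== Notes on version B (the rewrite author's own statement) =====
-- stated objective: faster
-- what changed: Replaced the per-head loop summing identical SimpleRetention costs with a closed form: per-head cost computed once and multiplied by heads (O(heads) -> O(1)).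
-- outside the precondition, e.g. on analyze_MultiScaleRetention(8, -2, True, 3): A returns (288, 1056), B returns (160, 552)
import Mathlib
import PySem

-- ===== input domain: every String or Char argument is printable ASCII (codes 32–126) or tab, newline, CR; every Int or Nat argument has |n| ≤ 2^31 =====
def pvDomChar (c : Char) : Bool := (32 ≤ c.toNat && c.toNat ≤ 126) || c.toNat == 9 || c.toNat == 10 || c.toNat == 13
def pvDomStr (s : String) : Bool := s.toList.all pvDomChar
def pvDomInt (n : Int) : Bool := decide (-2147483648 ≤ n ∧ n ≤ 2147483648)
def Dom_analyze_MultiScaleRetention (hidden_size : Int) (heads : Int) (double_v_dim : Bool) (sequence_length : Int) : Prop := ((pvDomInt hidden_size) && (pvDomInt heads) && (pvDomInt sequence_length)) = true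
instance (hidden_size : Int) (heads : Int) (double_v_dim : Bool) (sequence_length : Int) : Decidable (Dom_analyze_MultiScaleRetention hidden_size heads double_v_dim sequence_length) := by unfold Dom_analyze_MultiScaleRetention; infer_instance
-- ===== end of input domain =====

-- ===== PORT A =====
-- B replaces A's per-head loop with a closed form (per-head cost once, times heads); objective: faster.
def analyze_SimpleRetention (hidden_size : Int) (head_size : Int) (v_dim : Int) (sequence_length : Int) : Int × Int :=
  let wq_params := hidden_size * head_size
  let wk_params := hidden_size * head_size
  let wv_params := hidden_size * v_dim
  let params := wq_params + wk_params + wv_params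
  let q_flops := sequence_length * hidden_size * head_size
  let k_flops := sequence_length * hidden_size * head_size
  let v_flops := sequence_length * hidden_size * v_dim
  let qk_flops := sequence_length * head_size * sequence_length
  let output_flops := sequence_length * sequence_length * v_dim
  let xpos_flops := sequence_length * head_size * 4
  let flops := q_flops + k_flops + v_flops + qk_flops + output_flops + xpos_flops
  (params, flops)

def analyze_MultiScaleRetention (hidden_size : Int) (heads : Int) (double_v_dim : Bool) (sequence_length : Int) : Int × Int :=
  let v_dim := if double_v_dim then hidden_size * 2 else hidden_size
  let head_size := PySem.Int.floordiv hidden_size heads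
  let head_v_dim := if double_v_dim then hidden_size * 2 else hidden_size
  let rpf := (PySem.List.pyRange 0 heads 1).foldl
      (fun (acc : Int × Int) _ =>
        let hr := analyze_SimpleRetention hidden_size head_size head_v_dim sequence_length
        (acc.1 + hr.1, acc.2 + hr.2)) (0, 0)
  let wg_params := hidden_size * v_dim
  let wo_params := v_dim * hidden_size
  let group_norm_params := 2 * v_dim
  let params := rpf.1 + wg_params + wo_params + group_norm_params
  let wg_flops := sequence_length * hidden_size * v_dim
  let swish_flops := sequence_length * v_dim * 2
  let output_flops := sequence_length * v_dim * hidden_size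
  let group_norm_flops := 4 * v_dim * sequence_length
  let flops := rpf.2 + wg_flops + swish_flops + output_flops + group_norm_flops
  (params, flops)

-- ===== PORT B =====
def analyze_MultiScaleRetention_alt (hidden_size : Int) (heads : Int) (double_v_dim : Bool) (sequence_length : Int) : Int × Int :=
  let v_dim := if double_v_dim then 2 * hidden_size else hidden_size
  let head_size := PySem.Int.floordiv hidden_size heads
  let per_head_params := hidden_size * (2 * head_size + v_dim)
  let per_head_flops := sequence_length * (hidden_size * (2 * head_size + v_dim)
      + head_size * (sequence_length + 4) + sequence_length * v_dim)
  (heads * per_head_params + 2 * hidden_size * v_dim + 2 * v_dim,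
   heads * per_head_flops + sequence_length * v_dim * (2 * hidden_size + 6))

-- ===== PRECONDITION & SPEC =====
-- Pre_ restricts to the natural domain heads >= 1: at heads = 0 Python A raises ZeroDivisionError,
-- and a negative head count is outside the task's natural domain (A's empty loop there is an accident
-- B's closed form does not mirror).
def Pre_analyze_MultiScaleRetention (hidden_size : Int) (heads : Int) (double_v_dim : Bool) (sequence_length : Int) : Prop := 1 ≤ heads
instance (hidden_size : Int) (heads : Int) (double_v_dim : Bool) (sequence_length : Int) : Decidable (Pre_analyze_MultiScaleRetention hidden_size heads double_v_dim sequence_length) := by unfold Pre_analyze_MultiScaleRetention; infer_instance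
def pvWitness_analyze_MultiScaleRetention : Int × Int × Bool × Int := (8, 2, true, 4)
def Spec_analyze_MultiScaleRetention (hidden_size : Int) (heads : Int) (double_v_dim : Bool) (sequence_length : Int) (out : Int × Int) : Prop := out = analyze_MultiScaleRetention_alt hidden_size heads double_v_dim sequence_length
instance (hidden_size : Int) (heads : Int) (double_v_dim : Bool) (sequence_length : Int) (out : Int × Int) : Decidable (Spec_analyze_MultiScaleRetention hidden_size heads double_v_dim sequence_length out) := by unfold Spec_analyze_MultiScaleRetention; infer_instance

-- ===== CLAIM (what is proved, stated in full; the proofs are below) =====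
def Claim_equal_analyze_MultiScaleRetention : Prop := ∀ (hidden_size : Int) (heads : Int) (double_v_dim : Bool) (sequence_length : Int), Dom_analyze_MultiScaleRetention hidden_size heads double_v_dim sequence_length → Pre_analyze_MultiScaleRetention hidden_size heads double_v_dim sequence_length → Spec_analyze_MultiScaleRetention hidden_size heads double_v_dim sequence_length (analyze_MultiScaleRetention hidden_size heads double_v_dim sequence_length)

-- ===== LEMMAS AND PROOFS =====
theorem foldl_const_pair_add (l : List Int) (p f a b : Int) :
    l.foldl (fun (acc : Int × Int) _ => (acc.1 + p, acc.2 + f)) (a, b)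
      = (a + l.length * p, b + l.length * f) := by
  induction l generalizing a b with
  | nil => simp
  | cons x xs ih => simp [ih]; constructor <;> push_cast <;> ring

-- ===== VERDICT (by name: the statement is the Claim_ definition above) =====
theorem analyze_MultiScaleRetention_spec : Claim_equal_analyze_MultiScaleRetention := by
  intro hidden_size heads double_v_dim sequence_length _ hpre
  unfold Spec_analyze_MultiScaleRetention analyze_MultiScaleRetention analyze_MultiScaleRetention_alt
  simp only [analyze_SimpleRetention, foldl_const_pair_add, PySem.List.length_pyRange_one]
  have hcast : (((heads - 0).toNat : Int)) = heads := by
    have : (1 : Int) ≤ heads := hpre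
    omega
  rw [hcast]
  cases double_v_dim <;> simp only [if_true, if_false, Bool.false_eq_true] <;>
    exact Prod.ext (by ring) (by ring)
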